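-- pv_equiv track=rewrite | github.com/phj9908/python-AlgorithmTest | Programmers/LV1/0605_8.py | solution
-- ===== SOURCE A (Python) =====
-- def solution(dartResult):
--     answer = 0
--     star=False
--     for i in range(len(dartResult)-1,-1,-1):
--         if dartResult[i].isalpha():
--             if i-2>=0 and dartResult[i-2].isdigit():
--                 x=int(dartResult[i - 2:i])
--             else:
--                 x = int(dartResult[i - 1])
--             if dartResult[i]=='T':
--                 x**=3
--             elif dartResult[i]=='D':
--                 x**=2
--
--             if star:
--                 x*=2
--                 star=False
--
--             if i+1<len(dartResult) and dartResult[i+1]=='*':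
--                 x*=2
--                 star=True
--             elif i+1<len(dartResult) and dartResult[i+1]=='#':
--                 x*=-1
--
--             answer+=x
--
--     return answer
-- ===== SOURCE B (Python) =====
-- def solution(dartResult):
--     # Single forward pass: accumulate the digit run, score each throw into a
--     # list, and let a '*' option double the current and the previous entry.
--     scores = []
--     digits = ""
--     n = len(dartResult)
--     for i, c in enumerate(dartResult):
--         if c.isdigit():
--             digits += c
--             continue
--         if c.isalpha():
--             x = int(digits)
--             if c == 'D':
--                 x = x * x
--             elif c == 'T':
--                 x = x * x * x
--             nxt = dartResult[i + 1] if i + 1 < n else ''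
--             if nxt == '*':
--                 x *= 2
--                 if scores:
--                     scores[-1] *= 2
--             elif nxt == '#':
--                 x = -x
--             scores.append(x)
--         digits = ""
--     return sum(scores)
-- ===== Notes on version B (the rewrite author's own statement) =====
-- stated objective: simpler
-- what changed: A scans the string backwards by index with a carried 'star' flag and re-parses each number via int() on slices; B makes one forward pass that accumulates the digit run, keeps a per-throw score list, and lets a '*' option double the current and the previous list entry.
-- outside the precondition, e.g. on solution('S9'): A returns 9, B raises ValueError; on solution('5 S'): A returns 5, B raises ValueError; on solution('123S'): A returns 23, B returns 123
import Mathlib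
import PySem

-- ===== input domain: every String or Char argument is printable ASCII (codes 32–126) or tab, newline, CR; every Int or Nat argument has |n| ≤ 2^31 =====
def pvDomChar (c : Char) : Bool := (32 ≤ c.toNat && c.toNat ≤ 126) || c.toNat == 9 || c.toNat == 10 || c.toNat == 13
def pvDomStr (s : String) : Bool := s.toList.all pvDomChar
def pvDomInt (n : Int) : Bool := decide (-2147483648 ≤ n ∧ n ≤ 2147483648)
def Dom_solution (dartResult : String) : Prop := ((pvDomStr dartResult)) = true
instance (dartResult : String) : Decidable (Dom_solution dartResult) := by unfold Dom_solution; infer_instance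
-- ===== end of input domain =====

-- B makes one forward pass with a per-throw score list instead of A's backward
-- index scan with a carried star flag and int() re-parsing of slices (objective: simpler).

-- ===== PORT A =====
-- one iteration of A's backward loop; the int() calls are PySem.Int.ofChars?,
-- whose failure (ValueError, outside Pre_) is defaulted to 0 via getD
def solnStepA (cs : List Char) (st : Int × Bool) (i : Int) : Int × Bool :=
  let c := (PySem.List.pyGet? cs i).getD ' '
  if PySem.Chars.isalpha c = true then
    let x0 : Int :=
      if 0 ≤ i - 2 ∧ PySem.Chars.isdigit ((PySem.List.pyGet? cs (i - 2)).getD ' ') = true then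
        (PySem.Int.ofChars? (PySem.List.slice cs (some (i - 2)) (some i))).getD 0
      else
        (PySem.Int.ofChars? [(PySem.List.pyGet? cs (i - 1)).getD ' ']).getD 0
    let x1 : Int := if c = 'T' then x0 ^ 3 else if c = 'D' then x0 ^ 2 else x0
    let x2 : Int := if st.2 then x1 * 2 else x1
    let s2 : Bool := if st.2 then false else st.2
    if PySem.List.pyGet? cs (i + 1) = some '*' then (st.1 + x2 * 2, true)
    else if PySem.List.pyGet? cs (i + 1) = some '#' then (st.1 + x2 * (-1), s2)
    else (st.1 + x2, s2)
  else st

def solution (dartResult : String) : Int :=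
  ((PySem.List.pyRange ((dartResult.toList.length : Int) - 1) (-1) (-1)).foldl
    (solnStepA dartResult.toList) (0, false)).1

-- ===== PORT B =====
-- scores[-1] *= 2 (no-op on the empty list)
def solnDoubleLast : List Int → List Int
  | [] => []
  | [v] => [2 * v]
  | x :: y :: xs => x :: solnDoubleLast (y :: xs)

-- one iteration of B's forward loop; state = (scores, digits); int(digits)
-- is PySem.Int.ofChars?, whose failure (ValueError, outside Pre_) is defaulted to 0
def solnStepB (cs : List Char) (st : List Int × List Char) (i : Int) : List Int × List Char :=
  let c := (PySem.List.pyGet? cs i).getD ' '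
  if PySem.Chars.isdigit c = true then
    (st.1, st.2 ++ [c])
  else if PySem.Chars.isalpha c = true then
    let x0 : Int := (PySem.Int.ofChars? st.2).getD 0
    let x1 : Int := if c = 'D' then x0 * x0
                    else if c = 'T' then x0 * x0 * x0 else x0
    let nxt := PySem.List.pyGet? cs (i + 1)
    if nxt = some '*' then (solnDoubleLast st.1 ++ [x1 * 2], [])
    else if nxt = some '#' then (st.1 ++ [-x1], [])
    else (st.1 ++ [x1], [])
  else (st.1, [])

def solution_alt (dartResult : String) : Int :=
  (((PySem.List.pyRange 0 (dartResult.toList.length : Int) 1).foldl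
    (solnStepB dartResult.toList) ([], [])).1).sum

-- ===== PRECONDITION & SPEC =====
-- Pre_ excludes strings in which some letter is not immediately preceded by a digit
-- run of length 1 or 2: on those A raises ValueError, or returns an accidental value
-- via negative-index wraparound ('S9'), whitespace-tolerant int() ('5 S'), or
-- last-two-digits truncation of a longer number ('123S').
def Pre_solution (dartResult : String) : Prop :=
  ∀ i, i < dartResult.toList.length →
    PySem.Chars.isalpha (dartResult.toList.getD i ' ') = true →
      1 ≤ i ∧ PySem.Chars.isdigit (dartResult.toList.getD (i - 1) ' ') = true ∧
      ¬(3 ≤ i ∧ PySem.Chars.isdigit (dartResult.toList.getD (i - 2) ' ') = true ∧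
        PySem.Chars.isdigit (dartResult.toList.getD (i - 3) ' ') = true)
instance (dartResult : String) : Decidable (Pre_solution dartResult) := by
  unfold Pre_solution; infer_instance

def pvWitness_solution : String := "1S2D*3T"

def Spec_solution (dartResult : String) (out : Int) : Prop := out = solution_alt dartResult
instance (dartResult : String) (out : Int) : Decidable (Spec_solution dartResult out) := by
  unfold Spec_solution; infer_instance

-- ===== CLAIM (what is proved, stated in full; the proofs are below) =====
def Claim_equal_solution : Prop := ∀ (dartResult : String), Dom_solution dartResult → Pre_solution dartResult → Spec_solution dartResult (solution dartResult)

-- ===== LEMMAS AND PROOFS =====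

theorem digitChar_cases (c : Char) (h : PySem.Chars.isdigit c = true) :
    c ∈ ['0','1','2','3','4','5','6','7','8','9'] := by
  simp [PySem.Chars.isdigit, Char.le_def, UInt32.le_iff_toNat_le] at h
  obtain ⟨h1, h2⟩ := h
  have e : ∀ (d : Char), c.toNat = d.toNat → c = d := by
    intro d hh; exact Char.ext (UInt32.toNat_inj.mp hh)
  set n := c.toNat with hn
  rw [eq_comm] at hn
  interval_cases n <;>
    simp only [List.mem_cons] <;>
    first
      | (refine Or.inl (e _ ?_); decide)
      | (refine Or.inr (Or.inl (e _ ?_)); decide)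
      | (refine Or.inr (Or.inr (Or.inl (e _ ?_))); decide)
      | (refine Or.inr (Or.inr (Or.inr (Or.inl (e _ ?_)))); decide)
      | (refine Or.inr (Or.inr (Or.inr (Or.inr (Or.inl (e _ ?_))))); decide)
      | (refine Or.inr (Or.inr (Or.inr (Or.inr (Or.inr (Or.inl (e _ ?_)))))); decide)
      | (refine Or.inr (Or.inr (Or.inr (Or.inr (Or.inr (Or.inr (Or.inl (e _ ?_))))))); decide)
      | (refine Or.inr (Or.inr (Or.inr (Or.inr (Or.inr (Or.inr (Or.inr (Or.inl (e _ ?_)))))))); decide)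
      | (refine Or.inr (Or.inr (Or.inr (Or.inr (Or.inr (Or.inr (Or.inr (Or.inr (Or.inl (e _ ?_))))))))); decide)
      | (refine Or.inr (Or.inr (Or.inr (Or.inr (Or.inr (Or.inr (Or.inr (Or.inr (Or.inr (Or.inl (e _ ?_)))))))))); decide)

theorem ofChars_one (c : Char) (h : PySem.Chars.isdigit c = true) :
    PySem.Int.ofChars? [c] = some ((c.toNat : Int) - 48) := by
  have := digitChar_cases c h
  fin_cases this <;> decide

theorem ofChars_two (a b : Char) (ha : PySem.Chars.isdigit a = true)
    (hb : PySem.Chars.isdigit b = true) :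
    PySem.Int.ofChars? [a, b] = some (10 * ((a.toNat : Int) - 48) + ((b.toNat : Int) - 48)) := by
  have h1 := digitChar_cases a ha
  have h2 := digitChar_cases b hb
  fin_cases h1 <;> fin_cases h2 <;> decide

theorem digit_not_alpha (c : Char) (h : PySem.Chars.isdigit c = true) :
    PySem.Chars.isalpha c = false := by
  have := digitChar_cases c h
  fin_cases this <;> decide

-- proof-side recursors over the index list
def aGo (cs : List Char) (k : Nat) : Int × Bool :=
  ((List.range' k (cs.length - k)).map (fun j => Int.ofNat j)).foldr
    (fun i st => solnStepA cs st i) (0, false)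

def bGo (cs : List Char) (k : Nat) (st : List Int × List Char) : List Int × List Char :=
  ((List.range' k (cs.length - k)).map (fun j => Int.ofNat j)).foldl (solnStepB cs) st

theorem aGo_stop (cs : List Char) (k : Nat) (h : cs.length ≤ k) : aGo cs k = (0, false) := by
  simp [aGo, Nat.sub_eq_zero_of_le h]

theorem bGo_stop (cs : List Char) (k : Nat) (st : List Int × List Char) (h : cs.length ≤ k) :
    bGo cs k st = st := by
  simp [bGo, Nat.sub_eq_zero_of_le h]

theorem aGo_peel (cs : List Char) (k : Nat) (h : k < cs.length) :
    aGo cs k = solnStepA cs (aGo cs (k + 1)) (k : Int) := by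
  have hm : cs.length - k = (cs.length - (k + 1)) + 1 := by omega
  rw [aGo, hm, List.range'_succ, List.map_cons, List.foldr_cons]
  rfl

theorem bGo_peel (cs : List Char) (k : Nat) (st : List Int × List Char) (h : k < cs.length) :
    bGo cs k st = bGo cs (k + 1) (solnStepB cs st (k : Int)) := by
  have hm : cs.length - k = (cs.length - (k + 1)) + 1 := by omega
  rw [bGo, hm, List.range'_succ, List.map_cons, List.foldl_cons]
  rfl

theorem solution_eq_aGo (s : String) : solution s = (aGo s.toList 0).1 := by
  unfold solution aGo
  rw [show ((s.toList.length : Int) - 1) = ((s.toList.length : Int) - 1) from rfl]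
  rw [PySem.List.pyRange_neg_one_eq_reverse]
  norm_num
  simp [PySem.List.pyRange_one, List.range_eq_range']

theorem solution_alt_eq_bGo (s : String) :
    solution_alt s = ((bGo s.toList 0 ([], [])).1).sum := by
  unfold solution_alt bGo
  simp [PySem.List.pyRange_one, List.range_eq_range']

def dv (cs : List Char) (j : Nat) : Int := ((cs.getD j ' ').toNat : Int) - 48

abbrev dig (cs : List Char) (j : Nat) : Prop := PySem.Chars.isdigit (cs.getD j ' ') = true


-- the forward state component `digits` correctly describes the trailing digit run of cs.take k
def DigOK (cs : List Char) (k : Nat) (dg : List Char) : Prop :=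
  (¬(1 ≤ k ∧ dig cs (k - 1)) → dg = []) ∧
  (1 ≤ k → dig cs (k - 1) → ¬(2 ≤ k ∧ dig cs (k - 2)) → dg = [cs.getD (k - 1) ' ']) ∧
  (2 ≤ k → dig cs (k - 1) → dig cs (k - 2) → ¬(3 ≤ k ∧ dig cs (k - 3)) →
    dg = [cs.getD (k - 2) ' ', cs.getD (k - 1) ' '])

theorem digOK_zero (cs : List Char) : DigOK cs 0 [] := by
  refine ⟨fun _ => rfl, ?_, ?_⟩ <;> omega

theorem digOK_digit (cs : List Char) (k : Nat) (dg : List Char)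
    (h : DigOK cs k dg) (hd : dig cs k) :
    DigOK cs (k + 1) (dg ++ [cs.getD k ' ']) := by
  obtain ⟨h0, hl1, hl2⟩ := h
  refine ⟨?_, ?_, ?_⟩
  · intro hc
    exact absurd ⟨by omega, by simpa using hd⟩ hc
  · intro _ _ hno
    have : dg = [] := h0 (fun hc => hno ⟨by omega, by
      have e : k + 1 - 2 = k - 1 := by omega
      rw [e]; exact hc.2⟩)
    simp [this]
  · intro h2 _ hdm1 hno
    have hk1 : 1 ≤ k := by omega
    have hdig1 : dig cs (k - 1) := by
      have e : k + 1 - 2 = k - 1 := by omega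
      rwa [e] at hdm1
    have hdg : dg = [cs.getD (k - 1) ' '] := by
      apply hl1 hk1 hdig1
      intro hc
      apply hno
      refine ⟨by omega, ?_⟩
      have e : k + 1 - 3 = k - 2 := by omega
      rw [e]; exact hc.2
    have e1 : k + 1 - 1 = k := by omega
    have e2 : k + 1 - 2 = k - 1 := by omega
    rw [hdg, e1, e2]
    rfl

theorem digOK_reset (cs : List Char) (k : Nat) (hnd : ¬ dig cs k) :
    DigOK cs (k + 1) [] := by
  refine ⟨fun _ => rfl, ?_, ?_⟩
  · intro _ hd _
    exact absurd (by simpa using hd) hnd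
  · intro _ hd _ _
    exact absurd (by simpa using hd) hnd

theorem sum_doubleLast (l : List Int) : (solnDoubleLast l).sum = l.sum + (l.getLast?).getD 0 := by
  induction l with
  | nil => simp [solnDoubleLast]
  | cons x xs ih =>
    cases xs with
    | nil => simp [solnDoubleLast]; ring
    | cons y ys =>
      simp only [solnDoubleLast, List.sum_cons, List.getLast?_cons_cons, ih]
      ring

theorem getD_cast (cs : List Char) (k : Nat) :
    (PySem.List.pyGet? cs (k : Int)).getD ' ' = cs.getD k ' ' := by
  simp [PySem.List.pyGet?_natCast, List.getD_eq_getElem?_getD]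

theorem stepA_skip (cs : List Char) (k : Nat) (st : Int × Bool)
    (hna : PySem.Chars.isalpha (cs.getD k ' ') = false) :
    solnStepA cs st (k : Int) = st := by
  rw [List.getD_eq_getElem?_getD] at hna
  simp [solnStepA, hna]

theorem stepB_digit (cs : List Char) (k : Nat) (st : List Int × List Char)
    (hd : dig cs k) :
    solnStepB cs st (k : Int) = (st.1, st.2 ++ [cs.getD k ' ']) := by
  have hd' := hd
  unfold dig at hd'
  rw [List.getD_eq_getElem?_getD] at hd'
  simp [solnStepB, hd', List.getD_eq_getElem?_getD]

theorem stepB_skip (cs : List Char) (k : Nat) (st : List Int × List Char)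
    (hnd : ¬ dig cs k)
    (hc : PySem.Chars.isalpha (cs.getD k ' ') = false) :
    solnStepB cs st (k : Int) = (st.1, []) := by
  have hnd' : PySem.Chars.isdigit (cs[k]?.getD ' ') = false := by
    rw [← List.getD_eq_getElem?_getD]
    revert hnd; unfold dig; cases PySem.Chars.isdigit (cs.getD k ' ') <;> simp
  rw [List.getD_eq_getElem?_getD] at hc
  simp [solnStepB, hnd', hc]

theorem parse_eq (cs : List Char) (k : Nat) (hk : k < cs.length) (h1 : 1 ≤ k)
    (hd1 : dig cs (k - 1)) :
    (if 0 ≤ (k : Int) - 2 ∧ PySem.Chars.isdigit ((PySem.List.pyGet? cs ((k : Int) - 2)).getD ' ') = true then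
        (PySem.Int.ofChars? (PySem.List.slice cs (some ((k : Int) - 2)) (some (k : Int)))).getD 0
      else
        (PySem.Int.ofChars? [(PySem.List.pyGet? cs ((k : Int) - 1)).getD ' ']).getD 0)
    = if 2 ≤ k ∧ dig cs (k - 2) then 10 * dv cs (k - 2) + dv cs (k - 1) else dv cs (k - 1) := by
  have hc1 : (k : Int) - 1 = ((k - 1 : Nat) : Int) := by omega
  by_cases h2 : 2 ≤ k ∧ dig cs (k - 2)
  · have hc2 : (k : Int) - 2 = ((k - 2 : Nat) : Int) := by omega
    have hcond : 0 ≤ (k : Int) - 2 ∧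
        PySem.Chars.isdigit ((PySem.List.pyGet? cs ((k : Int) - 2)).getD ' ') = true := by
      refine ⟨by omega, ?_⟩
      rw [hc2, getD_cast]
      exact h2.2
    rw [if_pos hcond, if_pos h2]
    have hslice : PySem.List.slice cs (some ((k : Int) - 2)) (some (k : Int)) =
        [cs.getD (k - 2) ' ', cs.getD (k - 1) ' '] := by
      rw [hc2, PySem.List.slice_natCast]
      have hlt2 : k - 2 < cs.length := by omega
      have hlt1 : k - 1 < cs.length := by omega
      have e21 : k - 2 + 1 = k - 1 := by omega
      have e2 : k - (k - 2) = 2 := by omega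
      rw [e2, List.drop_eq_getElem_cons hlt2, e21, List.drop_eq_getElem_cons hlt1]
      simp [List.getD_eq_getElem?_getD, hlt1, hlt2]
      rw [List.drop_eq_getElem_cons hlt1, List.take_succ_cons, List.take_zero]
    rw [hslice, ofChars_two _ _ h2.2 hd1]
    simp [dv]
  · have hcond : ¬(0 ≤ (k : Int) - 2 ∧
        PySem.Chars.isdigit ((PySem.List.pyGet? cs ((k : Int) - 2)).getD ' ') = true) := by
      intro hc
      apply h2
      have h2k : 2 ≤ k := by omega
      refine ⟨h2k, ?_⟩
      have hc2 : (k : Int) - 2 = ((k - 2 : Nat) : Int) := by omega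
      rw [hc2, getD_cast] at hc
      exact hc.2
    rw [if_neg hcond, if_neg h2, hc1, getD_cast, ofChars_one _ hd1]
    simp [dv]

-- the common per-throw value after the S/D/T power
def pw (cs : List Char) (k : Nat) (b : Int) : Int :=
  if cs.getD k ' ' = 'T' then b ^ 3 else if cs.getD k ' ' = 'D' then b ^ 2 else b

theorem stepA_alpha (cs : List Char) (k : Nat) (st : Int × Bool) (hk : k < cs.length)
    (ha : PySem.Chars.isalpha (cs.getD k ' ') = true) (h1 : 1 ≤ k) (hd1 : dig cs (k - 1)) :
    solnStepA cs st (k : Int) =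
      (let b : Int := if 2 ≤ k ∧ dig cs (k - 2) then 10 * dv cs (k - 2) + dv cs (k - 1)
                      else dv cs (k - 1)
       let x2 : Int := if st.2 then pw cs k b * 2 else pw cs k b
       if PySem.List.pyGet? cs ((k : Int) + 1) = some '*' then (st.1 + x2 * 2, true)
       else if PySem.List.pyGet? cs ((k : Int) + 1) = some '#' then (st.1 + x2 * (-1), false)
       else (st.1 + x2, false)) := by
  have ha' : PySem.Chars.isalpha (cs[k]?.getD ' ') = true := by
    rwa [List.getD_eq_getElem?_getD] at ha
  have hparse := parse_eq cs k hk h1 hd1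
  unfold solnStepA
  simp only [PySem.List.pyGet?_natCast, ← List.getD_eq_getElem?_getD]
  rw [if_pos ha, hparse]
  simp only [pw]
  cases st.2 <;> simp

theorem stepB_alpha (cs : List Char) (k : Nat) (sc : List Int) (dg : List Char)
    (ha : PySem.Chars.isalpha (cs.getD k ' ') = true) (hnd : ¬ dig cs k) :
    solnStepB cs (sc, dg) (k : Int) =
      (let x1 : Int := pw cs k ((PySem.Int.ofChars? dg).getD 0)
       if PySem.List.pyGet? cs ((k : Int) + 1) = some '*' then (solnDoubleLast sc ++ [x1 * 2], [])
       else if PySem.List.pyGet? cs ((k : Int) + 1) = some '#' then (sc ++ [-x1], [])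
       else (sc ++ [x1], [])) := by
  have hnd' : PySem.Chars.isdigit (cs.getD k ' ') = false := by
    revert hnd; unfold dig; cases PySem.Chars.isdigit (cs.getD k ' ') <;> simp
  unfold solnStepB
  have hg : ∀ d : Char, cs[k]?.getD d = cs.getD k d :=
    fun d => by rw [List.getD_eq_getElem?_getD]
  simp only [PySem.List.pyGet?_natCast, hg]
  have hndq : PySem.Chars.isdigit (cs[k]?.getD ' ') = false := by rw [hg ' ']; exact hnd'
  have haq : PySem.Chars.isalpha (cs[k]?.getD ' ') = true := by rw [hg ' ']; exact ha
  rw [if_neg (by simp [hndq])]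
  rw [if_pos (by simp [haq])]
  simp only [pw]
  by_cases hcT : cs.getD k ' ' = 'T'
  · rw [hcT]
    split_ifs <;>
      first
        | (exfalso; exact absurd (by assumption : ('T' : Char) = 'D') (by decide))
        | (simp; try ring)
  · by_cases hcD : cs.getD k ' ' = 'D'
    · rw [hcD]
      split_ifs <;>
        first
          | (exfalso; exact absurd (by assumption : ('D' : Char) = 'T') (by decide))
          | (simp; try ring)
    · simp only [hcT, hcD, if_false]

theorem mainLoop (cs : List Char)
    (hpre : ∀ i, i < cs.length → PySem.Chars.isalpha (cs.getD i ' ') = true →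
      1 ≤ i ∧ dig cs (i - 1) ∧ ¬(3 ≤ i ∧ dig cs (i - 2) ∧ dig cs (i - 3))) :
    ∀ (m k : Nat), cs.length - k = m → ∀ (sc : List Int) (dg : List Char),
      DigOK cs k dg →
      ((bGo cs k (sc, dg)).1).sum
        = sc.sum + (if (aGo cs k).2 then (sc.getLast?).getD 0 else 0) + (aGo cs k).1 := by
  intro m
  induction m with
  | zero =>
    intro k hm sc dg _
    have hk : cs.length ≤ k := by omega
    rw [bGo_stop _ _ _ hk, aGo_stop _ _ hk]
    simp
  | succ m ih =>
    intro k hm sc dg hok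
    have hk : k < cs.length := by omega
    have hm' : cs.length - (k + 1) = m := by omega
    rw [bGo_peel _ _ _ hk, aGo_peel _ _ hk]
    by_cases hd : dig cs k
    · -- digit character: B extends the run, A skips
      rw [stepB_digit _ _ _ hd,
          stepA_skip _ _ _ (digit_not_alpha _ hd)]
      exact ih (k + 1) hm' sc _ (digOK_digit cs k dg hok hd)
    · by_cases ha : PySem.Chars.isalpha (cs.getD k ' ') = true
      · -- a throw
        obtain ⟨h1, hd1, hno3⟩ := hpre k hk ha
        -- the base number agrees
        have hbase :
            (PySem.Int.ofChars? dg).getD 0 =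
            (if 2 ≤ k ∧ dig cs (k - 2) then 10 * dv cs (k - 2) + dv cs (k - 1)
             else dv cs (k - 1)) := by
          by_cases h2 : 2 ≤ k ∧ dig cs (k - 2)
          · rw [if_pos h2, hok.2.2 h2.1 hd1 h2.2 (fun hc => hno3 ⟨hc.1, h2.2, hc.2⟩)]
            rw [ofChars_two _ _ h2.2 hd1]
            simp [dv]
          · rw [if_neg h2, hok.2.1 h1 hd1 h2, ofChars_one _ hd1]
            simp [dv]
        rw [stepA_alpha cs k _ hk ha h1 hd1, stepB_alpha cs k sc dg ha hd]
        simp only [hbase]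
        have hok' := digOK_reset cs k hd
        by_cases hstar : PySem.List.pyGet? cs ((k : Int) + 1) = some '*'
        · rw [if_pos hstar, if_pos hstar]
          rw [ih (k + 1) hm' _ _ hok']
          simp [sum_doubleLast, List.sum_append]
          split_ifs <;> ring
        · rw [if_neg hstar, if_neg hstar]
          by_cases hhash : PySem.List.pyGet? cs ((k : Int) + 1) = some '#'
          · rw [if_pos hhash, if_pos hhash]
            rw [ih (k + 1) hm' _ _ hok']
            simp [List.sum_append]
            split_ifs <;> ring
          · rw [if_neg hhash, if_neg hhash]
            rw [ih (k + 1) hm' _ _ hok']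
            simp [List.sum_append]
            split_ifs <;> ring
      · -- garbage character: both skip (B resets the run)
        have ha' : PySem.Chars.isalpha (cs.getD k ' ') = false := by
          cases h : PySem.Chars.isalpha (cs.getD k ' ')
          · rfl
          · exact absurd h ha
        rw [stepB_skip _ _ _ hd ha', stepA_skip _ _ _ ha']
        exact ih (k + 1) hm' sc _ (digOK_reset cs k hd)

-- ===== VERDICT (by name: the statement is the Claim_ definition above) =====
theorem solution_spec : Claim_equal_solution := by
  intro s _hdom hpre
  unfold Spec_solution
  rw [solution_eq_aGo, solution_alt_eq_bGo]
  have h := mainLoop s.toList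
    (fun i hi ha => by simpa [dig] using hpre i hi ha)
    s.toList.length 0 (by omega) [] [] (digOK_zero _)
  simp at h
  rw [h]
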